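-- pv_equiv track=rewrite | github.com/homsar/desutunes | processfile.py | split_id3_title
-- ===== SOURCE A (Python) =====
-- def split_id3_title(id3_title):
--     """
--     Take a 'Title (role)'-style ID3 title and return (title, role)
--     from https://github.com/colons/nkd.su/blob/230a68e2f7231a3b8e80dea9f2a628d637b0792e/nkdsu/apps/vote/utils.py
--     """
--     role = None
--
--     bracket_depth = 0
--     for i in range(1, len(id3_title)+1):
--         char = id3_title[-i]
--         if char == ')':
--             bracket_depth += 1
--         elif char == '(':
--             bracket_depth -= 1
--
--         if bracket_depth == 0:
--             if i != 1:
--                 role = id3_title[len(id3_title)-i:]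
--             break
--
--     if role:
--         title = id3_title.replace(role, '').strip()
--         role = role[1:-1]  # strip brackets
--     else:
--         title = id3_title
--
--     return title, role
-- ===== SOURCE B (Python) =====
-- def split_id3_title(id3_title):
--     """
--     Take a 'Title (role)'-style ID3 title and return (title, role).
--
--     Forward two-pass version: precompute the total bracket balance, then one
--     left-to-right scan remembering the LAST position whose running balance
--     equals the total -- that position starts the shortest balanced suffix,
--     i.e. the trailing "(role)" group.
--     """
--     role = None
--     if id3_title.endswith(')'):
--         target = id3_title.count(')') - id3_title.count('(')
--         net = 0
--         start = None
--         for m, ch in enumerate(id3_title[:-1]):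
--             if net == target:
--                 start = m
--             if ch == ')':
--                 net += 1
--             elif ch == '(':
--                 net -= 1
--         if start is not None:
--             role = id3_title[start:]
--
--     if role:
--         title = id3_title.replace(role, '').strip()
--         role = role[1:-1]  # strip brackets
--     else:
--         title = id3_title
--
--     return title, role
-- ===== Notes on version B (the rewrite author's own statement) =====
-- stated objective: alternative
-- what changed: Backward right-to-left depth-counting scan with early break is replaced by a forward two-pass: precompute the total bracket balance with count(), then one left-to-right pass remembering the last index whose running balance equals the total (the start of the trailing balanced '(role)' group), guarded by endswith(')').
-- intended difference: On strings that end with '(' but contain a balanced proper suffix (e.g. ')('), A's depth counter still hits zero and returns a mangled title with a bogus role (('', '') for ')('), while B requires the title to end with ')' and returns the string unchanged with role None, which is the intended behaviour for a trailing-'(role)' splitter. — e.g. on split_id3_title(")("): A returns ("", some ""), B returns (")(", none)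
import Mathlib
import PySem

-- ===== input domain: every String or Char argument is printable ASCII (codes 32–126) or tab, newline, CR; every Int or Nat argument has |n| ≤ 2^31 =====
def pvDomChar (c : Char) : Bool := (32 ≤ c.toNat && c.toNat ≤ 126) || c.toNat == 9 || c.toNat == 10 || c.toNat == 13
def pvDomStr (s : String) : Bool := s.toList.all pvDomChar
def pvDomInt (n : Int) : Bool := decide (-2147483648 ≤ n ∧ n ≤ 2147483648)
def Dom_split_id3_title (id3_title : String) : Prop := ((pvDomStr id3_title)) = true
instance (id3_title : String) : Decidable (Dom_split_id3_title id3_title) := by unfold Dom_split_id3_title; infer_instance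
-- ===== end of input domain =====

-- B replaces A's backward depth-counting scan by a forward two-pass (total bracket balance,
-- then last index whose running balance equals it) guarded by endswith(')'); same cost,
-- and B deliberately returns (s, None) on the D_ corner where A mangles the title.

-- ===== PORT A =====
-- A's loop reads id3_title[-i] for i = 1, 2, …: ported as a structural recursion over the
-- reversed character list, carrying i and bracket_depth exactly as the Python does.
def splitA_loop (cs : List Char) (rev : List Char) (i : Nat) (depth : Int) : Option (List Char) :=
  match rev with
  | [] => none
  | c :: rest =>
    let d := if c = ')' then depth + 1 else if c = '(' then depth - 1 else depth
    if d = 0 then (if i ≠ 1 then some (cs.drop (cs.length - i)) else none)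
    else splitA_loop cs rest (i + 1) d

def split_id3_title (id3_title : String) : String × Option String :=
  let cs := id3_title.toList
  let role := splitA_loop cs cs.reverse 1 0
  match role with
  | some r =>
    if r ≠ [] then
      (String.ofList (PySem.Chars.strip (PySem.Chars.replace cs r [])),
       some (String.ofList (PySem.Chars.slice r (some 1) (some (-1)))))
    else (id3_title, none)
  | none => (id3_title, none)

-- ===== PORT B =====
-- one fold step of B's forward scan: remember the index if the running balance hits the
-- target, then update the balance with the current character
def splitB_step (target : Int) (st : Int × Option Int) (p : Int × Char) : Int × Option Int :=
  let st := if st.1 = target then (st.1, some p.1) else st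
  (if p.2 = ')' then st.1 + 1 else if p.2 = '(' then st.1 - 1 else st.1, st.2)

def split_id3_title_alt (id3_title : String) : String × Option String :=
  let cs := id3_title.toList
  let role : Option (List Char) :=
    if PySem.Chars.endswith cs [')'] then
      let target : Int := (PySem.Chars.count cs [')'] : Int) - (PySem.Chars.count cs ['('] : Int)
      let res := (PySem.List.enumerate (PySem.List.slice cs none (some (-1))) 0).foldl
                   (splitB_step target) (0, none)
      match res.2 with
      | some m => some (PySem.List.slice cs (some m) none)
      | none => none
    else none
  match role with
  | some r =>
    if r ≠ [] then
      (String.ofList (PySem.Chars.strip (PySem.Chars.replace cs r [])),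
       some (String.ofList (PySem.Chars.slice r (some 1) (some (-1)))))
    else (id3_title, none)
  | none => (id3_title, none)

-- ===== PRECONDITION & SPEC =====
-- On strings that end with '(' but contain a bracket-balanced proper suffix (e.g. ")("),
-- A's depth counter still hits zero and returns a mangled title with a bogus role
-- (("", "") for ")("), while B returns the string unchanged with role None — the intended
-- behaviour for a trailing-"(role)" splitter.
def D_split_id3_title (id3_title : String) : Prop :=
  id3_title.toList.getLast? = some '(' ∧
  ((List.range (id3_title.toList.length - 1)).any
    (fun m => (id3_title.toList.drop m).count ')' == (id3_title.toList.drop m).count '(')) = true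

instance (id3_title : String) : Decidable (D_split_id3_title id3_title) := by
  unfold D_split_id3_title; infer_instance

def Spec_split_id3_title (id3_title : String) (out : String × Option String) : Prop :=
  ¬ D_split_id3_title id3_title → out = split_id3_title_alt id3_title

instance (id3_title : String) (out : String × Option String) : Decidable (Spec_split_id3_title id3_title out) := by
  unfold Spec_split_id3_title; infer_instance

def pvDiffWitness_split_id3_title : String := ")("

def pvDiffWitnessOut_split_id3_title : (String × Option String) × (String × Option String) :=
  (("", some ""), (")(", none))

-- ===== CLAIM (what is proved, stated in full; the proofs are below) =====
def Claim_unchanged_split_id3_title : Prop := ∀ (id3_title : String), Dom_split_id3_title id3_title → Spec_split_id3_title id3_title (split_id3_title id3_title)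

def Claim_changed_split_id3_title : Prop := Dom_split_id3_title (pvDiffWitness_split_id3_title) ∧ D_split_id3_title (pvDiffWitness_split_id3_title) ∧ split_id3_title (pvDiffWitness_split_id3_title) = pvDiffWitnessOut_split_id3_title.1 ∧ split_id3_title_alt (pvDiffWitness_split_id3_title) = pvDiffWitnessOut_split_id3_title.2 ∧ pvDiffWitnessOut_split_id3_title.1 ≠ pvDiffWitnessOut_split_id3_title.2

def Claim_exact_split_id3_title : Prop := ∀ (id3_title : String), Dom_split_id3_title id3_title → D_split_id3_title id3_title → split_id3_title id3_title ≠ split_id3_title_alt id3_title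

-- ===== LEMMAS AND PROOFS =====

-- net bracket balance of a character / a character list, as A's loop accumulates it
def pvCharBal (c : Char) : Int := if c = ')' then 1 else if c = '(' then -1 else 0

def pvBal (l : List Char) : Int := (l.count ')' : Int) - (l.count '(' : Int)

theorem pvBal_cons (c : Char) (l : List Char) : pvBal (c :: l) = pvCharBal c + pvBal l := by
  simp only [pvBal, pvCharBal, List.count_cons]
  by_cases h1 : c = ')' <;> by_cases h2 : c = '(' <;> simp [h1, h2] <;> push_cast <;> ring

theorem pvBal_append (a b : List Char) : pvBal (a ++ b) = pvBal a + pvBal b := by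
  simp only [pvBal, List.count_append]; push_cast; ring

theorem pv_if_chain (c : Char) (d : Int) :
    (if c = ')' then d + 1 else if c = '(' then d - 1 else d) = d + pvCharBal c := by
  simp only [pvCharBal]; split_ifs <;> ring

theorem pv_find?_congr {α : Type} (p q : α → Bool) (l : List α) (h : ∀ a ∈ l, p a = q a) :
    l.find? p = l.find? q := by
  induction l with
  | nil => rfl
  | cons a l ih => simp only [List.find?_cons, h a (by simp)]; split <;> simp_all

theorem count_go_single (c : Char) (s : List Char) :
    ∀ (fuel acc : Nat), s.length ≤ fuel →
      PySem.Chars.count.go [c] fuel s acc = acc + s.count c := by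
  induction s with
  | nil => intro fuel acc h; cases fuel <;> simp [PySem.Chars.count.go]
  | cons a t ih =>
    intro fuel acc h
    cases fuel with
    | zero => simp at h
    | succ f =>
      rw [PySem.Chars.count.go]
      by_cases hc : a = c
      · simp only [List.isPrefixOf, hc, BEq.rfl, Bool.and_true, if_true,
          List.length_cons, List.drop_succ_cons]
        simp only [List.length_nil, List.drop_zero]
        rw [ih f (acc + 1) (by simpa using h)]
        simp [List.count_cons]
        omega
      · have hp : [c].isPrefixOf (a :: t) = false := by
          simp [List.isPrefixOf]; exact fun h => absurd h.symm hc
        simp only [hp]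
        rw [ih f acc (by simpa using h)]
        simp [List.count_cons, hc]

theorem chars_count_single (s : List Char) (c : Char) :
    PySem.Chars.count s [c] = s.count c := by
  simp [PySem.Chars.count, count_go_single c s s.length 0 le_rfl]

-- characterisation of A's loop: starting with t characters still unread (the prefix cs.take t),
-- i = cs.length - t + 1 and depth = balance of the already-read suffix, the loop returns the
-- first k among the remaining indices with balanced length-k suffix, mapped through A's break body
theorem splitA_loop_char (cs : List Char) :
    ∀ (t : Nat), t ≤ cs.length →
      splitA_loop cs ((cs.take t).reverse) (cs.length - t + 1) (pvBal (cs.drop t)) =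
        ((List.range' (cs.length - t + 1) t).find?
            (fun k => pvBal (cs.drop (cs.length - k)) == 0)).bind
          (fun k => if k ≠ 1 then some (cs.drop (cs.length - k)) else none) := by
  intro t
  induction t with
  | zero => intro _; simp [splitA_loop]
  | succ t ih =>
    intro ht
    have htlt : t < cs.length := by omega
    have htake : cs.take (t+1) = cs.take t ++ [cs[t]] := by
      rw [List.take_add_one, List.getElem?_eq_getElem htlt]; rfl
    have hdrop : cs.drop t = cs[t] :: cs.drop (t+1) := List.drop_eq_getElem_cons htlt
    have harith : cs.length - (t+1) + 1 = cs.length - t := by omega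
    rw [htake, List.reverse_append, List.reverse_singleton, harith]
    show splitA_loop cs (cs[t] :: (cs.take t).reverse) (cs.length - t) (pvBal (cs.drop (t+1))) = _
    rw [splitA_loop]
    simp only [pv_if_chain]
    have hbal : pvBal (cs.drop (t+1)) + pvCharBal cs[t] = pvBal (cs.drop t) := by
      rw [hdrop, pvBal_cons]; ring
    rw [hbal]
    rw [List.range'_succ, List.find?_cons]
    have e1 : cs.length - (cs.length - t) = t := by omega
    rw [e1]
    by_cases hz : pvBal (cs.drop t) = 0
    · have hb : (pvBal (cs.drop t) == 0) = true := by simpa using hz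
      simp [hb, hz, e1]
    · have hb : (pvBal (cs.drop t) == 0) = false := by simpa using hz
      simp only [hb, if_neg hz]
      exact ih (by omega)

-- characterisation of B's fold: it computes the total balance together with the LAST index m
-- (in the scanned block, global positions range' p.length l.length) whose prefix balance hits target
theorem splitB_fold_char (g : List Char) (target : Int) :
    ∀ (l p : List Char) (st : Option Int), g = p ++ l →
      (PySem.List.enumerate l (p.length : Int)).foldl (splitB_step target) (pvBal p, st) =
        (pvBal g,
         match (List.range' p.length l.length).reverse.find?
             (fun m => pvBal (g.take m) == target) with
         | some m => some (m : Int)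
         | none => st) := by
  intro l
  induction l with
  | nil => intro p st hg; simp [PySem.List.enumerate, hg]
  | cons c l' ih =>
    intro p st hg
    rw [PySem.List.enumerate_cons, List.foldl_cons]
    have hsing : pvBal (p ++ [c]) = pvBal p + pvCharBal c := by
      rw [pvBal_append, pvBal_cons]; simp [pvBal]
    have hstep : splitB_step target (pvBal p, st) ((p.length : Int), c) =
        (pvBal (p ++ [c]), if pvBal p = target then some (p.length : Int) else st) := by
      simp only [splitB_step, pv_if_chain, hsing]
      by_cases h : pvBal p = target <;> simp [h]
    rw [hstep]
    have hlen : ((p.length : Int) + 1) = ((p ++ [c]).length : Int) := by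
      simp
    rw [hlen]
    have hg' : g = (p ++ [c]) ++ l' := by simp [hg]
    rw [ih (p ++ [c]) _ hg']
    congr 1
    have hr : List.range' p.length (l'.length + 1) = p.length :: List.range' (p.length + 1) l'.length :=
      List.range'_succ ..
    simp only [List.length_cons, hr, List.reverse_cons, List.find?_append]
    have htp : pvBal (g.take p.length) = pvBal p := by
      rw [hg, List.take_left]
    by_cases hfind : (List.range' (p.length + 1) l'.length).reverse.find?
        (fun m => pvBal (g.take m) == target) |>.isSome
    · obtain ⟨m, hm⟩ := Option.isSome_iff_exists.mp hfind
      simp [hm, List.length_append]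
    · rw [Option.not_isSome_iff_eq_none] at hfind
      simp only [hfind, Option.none_or, List.length_append]
      by_cases h : pvBal p = target
      · have : (pvBal (g.take p.length) == target) = true := by simp [htp, h]
        simp [List.find?, this, hfind, h]
      · have : (pvBal (g.take p.length) == target) = false := by simp [htp, h]
        simp [List.find?, this, hfind, h]

theorem splitA_loop_char0 (cs : List Char) :
    splitA_loop cs cs.reverse 1 0 =
      ((List.range' 1 cs.length).find? (fun k => pvBal (cs.drop (cs.length - k)) == 0)).bind
        (fun k => if k ≠ 1 then some (cs.drop (cs.length - k)) else none) := by
  have h := splitA_loop_char cs cs.length le_rfl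
  simpa [pvBal] using h

theorem pv_endswith_concat (q : List Char) (c : Char) :
    PySem.Chars.endswith (q ++ [c]) [')'] = (c == ')') := by
  by_cases h : c = ')'
  · subst h
    have : PySem.Chars.endswith (q ++ [')']) [')'] = true := by
      rw [PySem.Chars.endswith_iff]; exact ⟨q, rfl⟩
    simp [this]
  · have : ¬ ([')'] <:+ (q ++ [c])) := by
      rintro ⟨t, ht⟩
      have := congrArg List.getLast? ht
      simp [List.getLast?_concat] at this
      exact h this.symm
    have hf : PySem.Chars.endswith (q ++ [c]) [')'] = false := by
      rw [← Bool.not_eq_true, PySem.Chars.endswith_iff]; exact this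
    simp [hf]
    exact fun hc => absurd hc h

theorem pv_bal_take_drop (cs : List Char) (m : Nat) :
    pvBal cs = pvBal (cs.take m) + pvBal (cs.drop m) := by
  conv_lhs => rw [← List.take_append_drop m cs]
  exact pvBal_append _ _

-- the two role computations agree outside D_
theorem role_eq (cs : List Char)
    (hD : ¬ (cs.getLast? = some '(' ∧
      ((List.range (cs.length - 1)).any
        (fun m => (cs.drop m).count ')' == (cs.drop m).count '(')) = true)) :
    splitA_loop cs cs.reverse 1 0 =
      (if PySem.Chars.endswith cs [')'] then
        let target : Int := (PySem.Chars.count cs [')'] : Int) - (PySem.Chars.count cs ['('] : Int)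
        let res := (PySem.List.enumerate (PySem.List.slice cs none (some (-1))) 0).foldl
                     (splitB_step target) (0, none)
        match res.2 with
        | some m => some (PySem.List.slice cs (some m) none)
        | none => none
      else none) := by
  induction cs using List.reverseRecOn with
  | nil => simp [splitA_loop]; decide
  | append_singleton q c _ =>
    rw [splitA_loop_char0]
    have hn : (q ++ [c]).length = q.length + 1 := by simp
    have hslice : PySem.List.slice (q ++ [c]) none (some (-1)) = q := by
      rw [PySem.List.slice_to_neg_one]; simp
    have htarget : ((PySem.Chars.count (q ++ [c]) [')'] : Int) -
        (PySem.Chars.count (q ++ [c]) ['('] : Int)) = pvBal (q ++ [c]) := by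
      simp [chars_count_single, pvBal]
    rw [pv_endswith_concat, hslice, htarget]
    have hzero : (0 : Int) = ((List.length ([] : List Char) : Nat) : Int) := by simp
    have hbalnil : pvBal ([] : List Char) = 0 := by simp [pvBal]
    have hfold := splitB_fold_char q (pvBal (q ++ [c])) q [] none rfl
    rw [hbalnil] at hfold
    simp only [List.length_nil, Nat.cast_zero, List.nil_append] at hfold
    simp only [hfold]
    have hd1 : (q ++ [c]).drop ((q ++ [c]).length - 1) = [c] := by
      rw [hn]; simpa using List.drop_left (l₁ := q) (l₂ := [c])
    have hbal1 : pvBal [c] = pvCharBal c := by rw [show [c] = c :: [] from rfl, pvBal_cons, hbalnil]; ring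
    rw [hn, List.range'_succ, List.find?_cons]
    have hp1 : (pvBal ((q ++ [c]).drop (q.length + 1 - 1)) == 0) = (pvCharBal c == 0) := by
      have : q.length + 1 - 1 = (q ++ [c]).length - 1 := by simp
      rw [this, hd1, hbal1]
    rw [hp1]
    by_cases hc : c = ')'
    · -- last char is ')': both sides find the matching start
      subst hc
      have hcb : (pvCharBal ')' == 0) = false := by decide
      rw [hcb]
      rw [if_pos (show ((')' : Char) == ')') = true by decide)]
      rw [List.range'_eq_map_range (s := 2), List.reverse_range' (s := 0) (n := q.length),
        List.find?_map, List.find?_map]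
      have hcong : (List.range q.length).find?
            ((fun k => pvBal ((q ++ [')']).drop (q.length + 1 - k)) == 0) ∘ (fun x => 2 + x)) =
          (List.range q.length).find?
            ((fun m => pvBal (q.take m) == pvBal (q ++ [')'])) ∘ (fun x => 0 + q.length - 1 - x)) := by
        apply pv_find?_congr
        intro i hi
        have hi' : i < q.length := List.mem_range.mp hi
        simp only [Function.comp]
        have e1 : q.length + 1 - (2 + i) = q.length - 1 - i := by omega
        have e2 : 0 + q.length - 1 - i = q.length - 1 - i := by omega
        rw [e1, e2]
        have hm : q.length - 1 - i ≤ q.length := by omega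
        have htk : q.take (q.length - 1 - i) = (q ++ [')']).take (q.length - 1 - i) :=
          (List.take_append_of_le_length hm).symm
        have hsplit := pv_bal_take_drop (q ++ [')']) (q.length - 1 - i)
        rw [htk]
        rw [Bool.eq_iff_iff]
        simp only [beq_iff_eq]
        omega
      rw [hcong]
      cases hfind : (List.range q.length).find?
          ((fun m => pvBal (q.take m) == pvBal (q ++ [')'])) ∘ (fun x => 0 + q.length - 1 - x)) with
      | none => simp
      | some i =>
        have hi : i < q.length := List.mem_range.mp (List.mem_of_find?_eq_some hfind)
        have h21 : (2 + i ≠ 1) := by omega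
        have e1 : q.length + 1 - (2 + i) = q.length - 1 - i := by omega
        have e2 : 0 + q.length - 1 - i = q.length - 1 - i := by omega
        simp [h21, e1, PySem.List.slice_from_natCast]
    · -- last char is not ')': B returns no role
      have hcb : (c == ')') = false := by simp [hc]
      rw [hcb]
      simp only [if_false, Bool.false_eq_true]
      by_cases hc2 : c = '('
      · -- ends with '(': outside D_ the backward scan finds nothing either
        subst hc2
        have hcb2 : (pvCharBal '(' == 0) = false := by decide
        rw [hcb2]
        have hany : ((List.range ((q ++ ['(']).length - 1)).any
            (fun m => ((q ++ ['(']).drop m).count ')' == ((q ++ ['(']).drop m).count '(')) = false := by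
          by_contra hne
          have htrue : ((List.range ((q ++ ['(']).length - 1)).any
              (fun m => ((q ++ ['(']).drop m).count ')' == ((q ++ ['(']).drop m).count '(')) = true := by
            revert hne
            cases ((List.range ((q ++ ['(']).length - 1)).any
              (fun m => ((q ++ ['(']).drop m).count ')' == ((q ++ ['(']).drop m).count '(')) <;> simp
          exact hD ⟨List.getLast?_concat, htrue⟩
        have hnone : (List.range' 2 q.length).find?
            (fun k => pvBal ((q ++ ['(']).drop (q.length + 1 - k)) == 0) = none := by
          rw [List.find?_eq_none]
          intro k hk
          have hk' : 2 ≤ k ∧ k < 2 + q.length := by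
            constructor
            · exact (List.mem_range'_1.mp hk).1
            · exact (List.mem_range'_1.mp hk).2
          simp only [List.any_eq_false] at hany
          have hm : q.length + 1 - k < (q ++ ['(']).length - 1 := by
            rw [hn]; omega
          have := hany (q.length + 1 - k) (List.mem_range.mpr hm)
          simp only [beq_iff_eq] at this ⊢
          intro hbal0
          apply this
          have : ((((q ++ ['(']).drop (q.length + 1 - k)).count ')' : Int)) =
              (((q ++ ['(']).drop (q.length + 1 - k)).count '(' : Int) := by
            have := hbal0
            simp only [pvBal] at this
            omega
          exact_mod_cast this
        rw [hnone]
        rfl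
      · -- last char is no bracket at all: A breaks immediately with no role
        have hcb2 : (pvCharBal c == 0) = true := by
          simp [pvCharBal, hc, hc2]
        rw [hcb2]
        simp

-- ===== VERDICT (by name: the statement is the Claim_ definition above) =====
theorem split_id3_title_spec : Claim_unchanged_split_id3_title := by
  intro s hDom
  unfold Spec_split_id3_title
  intro hnD
  have hrole := role_eq s.toList (by simpa [D_split_id3_title] using hnD)
  simp only [split_id3_title, split_id3_title_alt]
  rw [hrole]

theorem split_id3_title_changed : Claim_changed_split_id3_title := by
  unfold Claim_changed_split_id3_title; decide

theorem split_id3_title_tight : Claim_exact_split_id3_title := by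
  intro s hDom hD
  obtain ⟨hlast, hany⟩ := hD
  have hne : s.toList ≠ [] := by
    intro h; rw [h] at hlast; simp at hlast
  have hlen1 : 0 < s.toList.length := List.length_pos_iff.mpr hne
  have hends : PySem.Chars.endswith s.toList [')'] = false := by
    rw [← Bool.not_eq_true, PySem.Chars.endswith_iff]
    rintro ⟨t, ht⟩
    rw [← ht, List.getLast?_concat] at hlast
    simp at hlast
  have hB : split_id3_title_alt s = (s, none) := by
    simp [split_id3_title_alt, hends]
  rw [hB]
  obtain ⟨m, hm, hpm⟩ := List.any_eq_true.mp hany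
  have hmlt : m < s.toList.length - 1 := List.mem_range.mp hm
  simp only [beq_iff_eq] at hpm
  have hbalm : pvBal (s.toList.drop m) = 0 := by simp [pvBal, hpm]
  have hsome := List.find?_isSome
      (p := fun k => pvBal (s.toList.drop (s.toList.length - k)) == 0)
      (xs := List.range' 1 s.toList.length) |>.mpr
      ⟨s.toList.length - m, List.mem_range'_1.mpr ⟨by omega, by omega⟩, by
        have e : s.toList.length - (s.toList.length - m) = m := by omega
        rw [e]; simp [hbalm]⟩
  obtain ⟨k₀, hk₀⟩ := Option.isSome_iff_exists.mp hsome
  have hk₀mem := List.mem_range'_1.mp (List.mem_of_find?_eq_some hk₀)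
  have hk₀p := List.find?_some hk₀
  have hk₀ne1 : k₀ ≠ 1 := by
    intro h1
    rw [h1] at hk₀p
    have hd1 : s.toList.drop (s.toList.length - 1) = [s.toList.getLast hne] :=
      List.drop_length_sub_one hne
    have hg : s.toList.getLast hne = '(' := by
      have h2 := List.getLast?_eq_some_getLast (l := s.toList) hne
      rw [hlast] at h2
      exact (Option.some_inj.mp h2).symm
    rw [hd1, hg] at hk₀p
    exact absurd hk₀p (by decide)
  have hr : s.toList.drop (s.toList.length - k₀) ≠ [] := by
    rw [Ne, List.drop_eq_nil_iff]
    omega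
  have hA : (split_id3_title s).2 =
      some (String.ofList (PySem.Chars.slice (s.toList.drop (s.toList.length - k₀)) (some 1) (some (-1)))) := by
    have hps : 0 < s.length := by simpa using hlen1
    have hpk : 0 < k₀ := hk₀mem.1
    simp only [split_id3_title, splitA_loop_char0, hk₀]
    simp [hk₀ne1, hps, hpk]
  intro heq
  have h2 := congrArg Prod.snd heq
  rw [hA] at h2
  simp at h2
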